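-- pv_equiv track=rewrite | github.com/vinta/fuck-coding-interviews | problems/reverse_only_alphabetical.py | reverse_only_alpha
-- ===== SOURCE A (Python) =====
-- def reverse_only_alpha(s):
--     left = 0
--     right = len(s) - 1
--     s_list = list(s)
--     while left < right:
--         if not s_list[left].isalpha():
--             left += 1
--             continue
--
--         if not s_list[right].isalpha():
--             right -= 1
--             continue
--
--         s_list[left], s_list[right] = s_list[right], s_list[left]
--         left += 1
--         right -= 1
--
--     return ''.join(s_list)
-- ===== SOURCE B (Python) =====
-- def reverse_only_alpha(s):
--     letters = [c for c in s if c.isalpha()]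
--     out = []
--     for c in s:
--         out.append(letters.pop() if c.isalpha() else c)
--     return ''.join(out)
-- ===== Notes on version B (the rewrite author's own statement) =====
-- stated objective: simpler
-- what changed: Replaces the converging two-pointer in-place swap loop with one forward pass that refills the alphabetical positions from a stack of the extracted letters (popped from the end).
import Mathlib
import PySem

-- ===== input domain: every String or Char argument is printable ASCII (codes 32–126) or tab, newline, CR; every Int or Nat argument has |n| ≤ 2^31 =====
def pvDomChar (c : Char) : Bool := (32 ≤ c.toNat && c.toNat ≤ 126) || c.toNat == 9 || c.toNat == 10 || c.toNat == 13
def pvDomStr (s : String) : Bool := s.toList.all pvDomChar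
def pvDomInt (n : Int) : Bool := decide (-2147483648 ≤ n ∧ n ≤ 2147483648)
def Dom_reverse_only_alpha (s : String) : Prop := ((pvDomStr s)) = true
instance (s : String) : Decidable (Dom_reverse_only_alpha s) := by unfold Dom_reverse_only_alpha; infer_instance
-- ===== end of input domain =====

-- B replaces A's converging two-pointer swap loop by one forward pass consuming a
-- stack of the extracted letters (objective: simpler decomposition; same cost).

-- ===== PORT A =====
-- A's while loop with the two converging indices; in Python both indices stay ≥ 0
-- throughout the loop (right is only decremented while left < right), so Nat indices
-- are exact; for the empty string Python starts with right = -1 and Lean with right = 0,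
-- and in both cases the loop body never runs.
def pvLoopA (l : List Char) (left right : Nat) : List Char :=
  if left < right then
    if !(PySem.Chars.isalpha l[left]!) then pvLoopA l (left + 1) right
    else if !(PySem.Chars.isalpha l[right]!) then pvLoopA l left (right - 1)
    else pvLoopA ((l.set left l[right]!).set right l[left]!) (left + 1) (right - 1)
  else l
termination_by right - left
decreasing_by all_goals omega

def reverse_only_alpha (s : String) : String :=
  String.ofList (pvLoopA s.toList 0 (s.toList.length - 1))

-- ===== PORT B =====
-- letters.pop() at each alphabetical position; the stack is the reversed letter list,
-- popped from the front.  The stack always holds one letter per remaining alphabetical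
-- character, so the [] branch of the pop is never reached.
def pvFillB (cs : List Char) (stack : List Char) : List Char :=
  match cs, stack with
  | [], _ => []
  | c :: rest, stack =>
    if PySem.Chars.isalpha c then
      match stack with
      | t :: st => t :: pvFillB rest st
      | [] => []
    else c :: pvFillB rest stack

def reverse_only_alpha_alt (s : String) : String :=
  String.ofList (pvFillB s.toList (s.toList.filter PySem.Chars.isalpha).reverse)

-- ===== PRECONDITION & SPEC =====
def Spec_reverse_only_alpha (s : String) (out : String) : Prop := out = reverse_only_alpha_alt s
instance (s : String) (out : String) : Decidable (Spec_reverse_only_alpha s out) := by unfold Spec_reverse_only_alpha; infer_instance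

-- ===== CLAIM (what is proved, stated in full; the proofs are below) =====
def Claim_equal_reverse_only_alpha : Prop := ∀ (s : String), Dom_reverse_only_alpha s → Spec_reverse_only_alpha s (reverse_only_alpha s)

-- ===== LEMMAS AND PROOFS =====

theorem pv_getBang_append_cons (pre t : List Char) (a : Char) :
    (pre ++ a :: t)[pre.length]! = a := by
  induction pre with
  | nil => rfl
  | cons x xs ih => simp [ih]

theorem pv_set_append_cons (pre t : List Char) (a x : Char) :
    (pre ++ a :: t).set pre.length x = pre ++ x :: t := by
  induction pre with
  | nil => rfl
  | cons y ys ih => simp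

theorem pv_fill_append (m1 m2 st1 st2 : List Char)
    (h : st1.length = (m1.filter PySem.Chars.isalpha).length) :
    pvFillB (m1 ++ m2) (st1 ++ st2) = pvFillB m1 st1 ++ pvFillB m2 st2 := by
  induction m1 generalizing st1 with
  | nil =>
    have : st1 = [] := List.eq_nil_of_length_eq_zero (by simpa using h)
    subst this; simp [pvFillB]
  | cons c r ih =>
    by_cases hc : PySem.Chars.isalpha c
    · simp only [List.filter_cons, hc, if_pos, List.length_cons] at h
      match st1, h with
      | t :: st1', h =>
        simp only [List.cons_append, pvFillB, hc, if_pos]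
        rw [ih st1' (by simpa using h)]
    · simp only [List.filter_cons, hc] at h
      simp only [List.cons_append, pvFillB, hc, if_neg, Bool.false_eq_true,
        not_false_iff]
      rw [ih st1 (by simpa using h)]

theorem pvFillB_cons_alpha (c : Char) (rest : List Char) (t : Char) (st : List Char)
    (hc : PySem.Chars.isalpha c = true) :
    pvFillB (c :: rest) (t :: st) = t :: pvFillB rest st := by
  simp [pvFillB, hc]

-- abbreviation used only below the claim block
def pvRevAlpha (m : List Char) : List Char :=
  pvFillB m (m.filter PySem.Chars.isalpha).reverse

-- the main invariant: A's loop on pre ++ m ++ suf with the pointers framing m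
-- produces B's refill of m
theorem pv_loopA_eq (n : Nat) : ∀ (m pre suf : List Char), m.length = n →
    pvLoopA (pre ++ m ++ suf) pre.length (pre.length + m.length - 1)
      = pre ++ pvRevAlpha m ++ suf := by
  induction n using Nat.strong_induction_on with
  | _ n ih =>
    intro m pre suf hlen
    match m, hlen with
    | [], hlen =>
      rw [pvLoopA]; simp [pvRevAlpha, pvFillB]
    | a :: rest, hlen =>
      match List.eq_nil_or_concat rest with
      | Or.inl h =>
        subst h
        rw [pvLoopA, if_neg (show ¬ pre.length < pre.length + [a].length - 1 by simp)]
        by_cases ha : PySem.Chars.isalpha a <;>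
          simp [pvRevAlpha, pvFillB, ha]
      | Or.inr ⟨mid, b, hmb⟩ =>
        rw [List.concat_eq_append] at hmb
        subst hmb
        have hcond : pre.length < pre.length + (a :: (mid ++ [b])).length - 1 := by
          simp only [List.length_cons, List.length_append, List.length_nil]; omega
        rw [pvLoopA, if_pos hcond]
        have hgetL : (pre ++ (a :: (mid ++ [b])) ++ suf)[pre.length]! = a := by
          rw [List.append_assoc]; exact pv_getBang_append_cons pre _ a
        have hassocR : pre ++ (a :: (mid ++ [b])) ++ suf
            = (pre ++ a :: mid) ++ b :: suf := by simp
        have hlenR : (pre ++ a :: mid).length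
            = pre.length + (a :: (mid ++ [b])).length - 1 := by simp only [List.length_cons, List.length_append, List.length_nil]; omega
        have hgetR : (pre ++ (a :: (mid ++ [b])) ++ suf)[pre.length + (a :: (mid ++ [b])).length - 1]! = b := by
          rw [hassocR, ← hlenR]; exact pv_getBang_append_cons _ _ b
        by_cases ha : PySem.Chars.isalpha a
        · rw [hgetL, if_neg (by simp [ha])]
          by_cases hb : PySem.Chars.isalpha b
          · -- both alphabetical: swap and recurse on mid
            rw [hgetR, if_neg (by simp [hb])]
            have hswap : ((pre ++ (a :: (mid ++ [b])) ++ suf).set pre.length b).set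
                (pre.length + (a :: (mid ++ [b])).length - 1) a
                = pre ++ (b :: (mid ++ [a])) ++ suf := by
              have h1 : (pre ++ (a :: (mid ++ [b])) ++ suf).set pre.length b
                  = pre ++ (b :: (mid ++ [b])) ++ suf := by
                rw [List.append_assoc pre, List.append_assoc pre]
                exact pv_set_append_cons pre _ a b
              rw [h1]
              have h2 : pre ++ (b :: (mid ++ [b])) ++ suf
                  = (pre ++ b :: mid) ++ b :: suf := by simp
              have h3 : pre ++ (b :: (mid ++ [a])) ++ suf
                  = (pre ++ b :: mid) ++ a :: suf := by simp
              rw [h2, h3, ← hlenR]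
              have : (pre ++ b :: mid).length = (pre ++ a :: mid).length := by simp
              rw [← this, pv_set_append_cons]
            rw [hswap]
            have harith : pre.length + (a :: (mid ++ [b])).length - 1 - 1
                = (pre ++ [b]).length + mid.length - 1 := by simp only [List.length_cons, List.length_append, List.length_nil]; omega
            have hre : pre ++ (b :: (mid ++ [a])) ++ suf
                = (pre ++ [b]) ++ mid ++ ([a] ++ suf) := by simp
            have hpl : pre.length + 1 = (pre ++ [b]).length := by simp
            rw [harith, hre, hpl,
              ih mid.length (by simp at hlen ⊢; omega) mid (pre ++ [b]) ([a] ++ suf) rfl]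
            -- identify B's value
            have hfil : ((a :: (mid ++ [b])).filter PySem.Chars.isalpha).reverse
                = b :: (mid.filter PySem.Chars.isalpha).reverse ++ [a] := by
              simp [List.filter_append, ha, hb]
            have : pvRevAlpha (a :: (mid ++ [b]))
                = b :: (pvRevAlpha mid ++ [a]) := by
              unfold pvRevAlpha
              rw [hfil]
              refine (pvFillB_cons_alpha a (mid ++ [b]) b
                ((mid.filter PySem.Chars.isalpha).reverse ++ [a]) ha).trans ?_
              rw [pv_fill_append mid [b] (mid.filter PySem.Chars.isalpha).reverse [a] (by simp)]
              simp [pvFillB, hb]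
            rw [this]; simp
          · -- right not alphabetical: drop it into the suffix
            rw [hgetR, if_pos (by simp [hb])]
            have harith : pre.length + (a :: (mid ++ [b])).length - 1 - 1
                = pre.length + (a :: mid).length - 1 := by simp
            have hre : pre ++ (a :: (mid ++ [b])) ++ suf
                = pre ++ (a :: mid) ++ ([b] ++ suf) := by simp
            rw [harith, hre,
              ih (a :: mid).length (by simp at hlen ⊢; omega) (a :: mid) pre ([b] ++ suf) rfl]
            have hfil : (a :: (mid ++ [b])).filter PySem.Chars.isalpha
                = (a :: mid).filter PySem.Chars.isalpha := by
              simp [List.filter_cons, List.filter_append, hb]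
            have : pvRevAlpha (a :: (mid ++ [b])) = pvRevAlpha (a :: mid) ++ [b] := by
              unfold pvRevAlpha
              rw [hfil]
              have := pv_fill_append (a :: mid) [b]
                ((a :: mid).filter PySem.Chars.isalpha).reverse []
                (by simp)
              rw [show (a :: (mid ++ [b])) = (a :: mid) ++ [b] by simp,
                ← List.append_nil ((a :: mid).filter PySem.Chars.isalpha).reverse, this]
              simp [pvFillB, hb]
            rw [this]; simp
        · -- left not alphabetical: move it into the prefix
          rw [hgetL, if_pos (by simp [ha])]
          have harith : pre.length + (a :: (mid ++ [b])).length - 1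
              = (pre ++ [a]).length + (mid ++ [b]).length - 1 := by simp only [List.length_cons, List.length_append, List.length_nil]; omega
          have hre : pre ++ (a :: (mid ++ [b])) ++ suf
              = (pre ++ [a]) ++ (mid ++ [b]) ++ suf := by simp
          have hpl : pre.length + 1 = (pre ++ [a]).length := by simp
          rw [harith, hre, hpl,
            ih (mid ++ [b]).length (by simp at hlen ⊢; omega) (mid ++ [b]) (pre ++ [a]) suf rfl]
          have : pvRevAlpha (a :: (mid ++ [b])) = a :: pvRevAlpha (mid ++ [b]) := by
            unfold pvRevAlpha
            simp [List.filter_cons, ha, pvFillB]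
          rw [this]; simp

-- ===== VERDICT (by name: the statement is the Claim_ definition above) =====
theorem reverse_only_alpha_spec : Claim_equal_reverse_only_alpha := by
  intro s _
  unfold Spec_reverse_only_alpha reverse_only_alpha reverse_only_alpha_alt
  have := pv_loopA_eq s.toList.length s.toList [] [] rfl
  simp only [List.nil_append, List.append_nil, List.length_nil] at this
  rw [show (0 : Nat) + s.toList.length - 1 = s.toList.length - 1 by omega] at this
  rw [this]; rfl
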